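-- pv_equiv track=rewrite | github.com/ming11eight/dev_test | week_1/체육복.py | solution
-- ===== SOURCE A (Python) =====
-- def solution(n, lost, reserve):
--     #방법1
--     '''
--     u=[1]*(n+2)
--     for i in reserve:
--         u[i]+=1
--     for i in lost:
--         u[i]-=1
--     for i in range(1,n+1):
--         if u[i-1]==0 and u[i]==2:
--             u[i-1:i+1]=[1,1]
--         elif u[i]==2 and u[i+1]==0:
--             u[i:i+2]=[1,1]
--     return len([x for x in u[1:n+1] if x>0])
--     '''
--
--     #방법2
--     s = set(lost) & set(reserve)
--     r = set(reserve)-s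
--     l = set(lost)-s
--     for x in sorted(r):
--         if x-1 in l:
--             l.remove(x-1)
--         elif x+1 in l:
--             l.remove(x+1)
--     return n-len(l)
-- ===== SOURCE B (Python) =====
-- def solution(n, lost, reserve):
--     # one left-to-right scan of the merged sorted student numbers with a
--     # 3-state machine (prev is: 1 = unmatched lost, 2 = unused spare, 0 = nothing),
--     # counting down the unmatched lost instead of mutating a lost-set.
--     ls, rs = set(lost), set(reserve)
--     only_l = ls - rs
--     only_r = rs - ls
--     unmatched = len(only_l)
--     prev, kind = None, 0
--     for x in sorted(only_l | only_r):
--         if x in only_r: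
--             if prev == x - 1 and kind == 1:
--                 unmatched -= 1
--                 kind = 0
--             else:
--                 kind = 2
--         else:
--             if prev == x - 1 and kind == 2:
--                 unmatched -= 1
--                 kind = 0
--             else:
--                 kind = 1
--         prev = x
--     return n - unmatched
-- ===== Notes on version B (the rewrite author's own statement) =====
-- stated objective: alternative
-- what changed: Replaces A's greedy over the sorted reserve-set that mutates the lost-set (membership tests at x-1/x+1 and removals) with a single left-to-right scan of the merged sorted student numbers driven by a 3-state machine (previous position is: unmatched lost / unused spare / nothing), decrementing an unmatched counter on each adjacent lost-spare pair.
import Mathlib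
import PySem

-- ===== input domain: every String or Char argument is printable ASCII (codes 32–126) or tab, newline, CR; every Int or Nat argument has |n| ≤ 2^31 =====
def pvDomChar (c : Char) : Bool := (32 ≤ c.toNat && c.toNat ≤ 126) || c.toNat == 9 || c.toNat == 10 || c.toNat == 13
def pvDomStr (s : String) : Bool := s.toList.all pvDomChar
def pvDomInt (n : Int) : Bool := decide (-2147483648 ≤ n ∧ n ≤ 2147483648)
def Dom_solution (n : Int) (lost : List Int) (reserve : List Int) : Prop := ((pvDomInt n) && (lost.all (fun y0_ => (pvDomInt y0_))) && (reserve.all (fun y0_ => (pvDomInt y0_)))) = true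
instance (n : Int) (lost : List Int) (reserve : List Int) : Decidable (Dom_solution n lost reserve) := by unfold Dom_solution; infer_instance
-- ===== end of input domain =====

-- B replaces A's reserve-greedy with set mutation by a single merged-sorted scan driven by a 3-state machine; objective: alternative, same cost.

-- ===== PORT A =====
-- one greedy step of A's loop body (l.remove is guarded by the membership test, so the total getD form is exact)
def aStep (l : PySem.Set Int) (x : Int) : PySem.Set Int :=
  if PySem.Set.contains l (x - 1) then (PySem.Set.remove? l (x - 1)).getD l
  else if PySem.Set.contains l (x + 1) then (PySem.Set.remove? l (x + 1)).getD l
  else l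

def solution (n : Int) (lost : List Int) (reserve : List Int) : Int :=
  -- s = set(lost) & set(reserve); r = set(reserve) - s; l = set(lost) - s
  let s : PySem.Set Int := PySem.Set.inter (PySem.Set.ofList lost) (PySem.Set.ofList reserve)
  let r : PySem.Set Int := PySem.Set.diff (PySem.Set.ofList reserve) s
  let l0 : PySem.Set Int := PySem.Set.diff (PySem.Set.ofList lost) s
  -- for x in sorted(r): if x-1 in l: l.remove(x-1) elif x+1 in l: l.remove(x+1)
  let lf : PySem.Set Int := (PySem.List.sorted r (fun x => x)).foldl aStep l0
  n - PySem.Set.len lf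

-- ===== PORT B =====
-- one step of B's scan: state = (unmatched, prev, kind) with kind 1 = prev is an unmatched lost, 2 = unused spare, 0 = nothing
def bStep (onlyR : PySem.Set Int) (st : Int × Option Int × Int) (x : Int) : Int × Option Int × Int :=
  if PySem.Set.contains onlyR x then
    if st.2.1 == some (x - 1) && st.2.2 == (1 : Int) then (st.1 - 1, some x, 0) else (st.1, some x, 2)
  else
    if st.2.1 == some (x - 1) && st.2.2 == (2 : Int) then (st.1 - 1, some x, 0) else (st.1, some x, 1)

def solution_alt (n : Int) (lost : List Int) (reserve : List Int) : Int :=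
  -- ls, rs = set(lost), set(reserve); only_l = ls - rs; only_r = rs - ls
  let ls : PySem.Set Int := PySem.Set.ofList lost
  let rs : PySem.Set Int := PySem.Set.ofList reserve
  let onlyL : PySem.Set Int := PySem.Set.diff ls rs
  let onlyR : PySem.Set Int := PySem.Set.diff rs ls
  -- unmatched = len(only_l); prev, kind = None, 0; for x in sorted(only_l | only_r): …
  let st := (PySem.List.sorted (PySem.Set.union onlyL onlyR) (fun x => x)).foldl
      (bStep onlyR) (PySem.Set.len onlyL, none, 0)
  n - st.1

-- ===== PRECONDITION & SPEC =====
def Spec_solution (n : Int) (lost : List Int) (reserve : List Int) (out : Int) : Prop := out = solution_alt n lost reserve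
instance (n : Int) (lost : List Int) (reserve : List Int) (out : Int) : Decidable (Spec_solution n lost reserve out) := by unfold Spec_solution; infer_instance

-- ===== CLAIM (what is proved, stated in full; the proofs are below) =====
def Claim_equal_solution : Prop := ∀ (n : Int) (lost : List Int) (reserve : List Int), Dom_solution n lost reserve → Spec_solution n lost reserve (solution n lost reserve)

-- ===== LEMMAS AND PROOFS =====

-- "the element prev+1 is still ahead of us and is a lost one whose removal A already performed": B's counter is one ahead of A's set
def pvPend (prev : Option Int) (kind : Int) (ol u : List Int) : Bool :=
  match prev with
  | some p => kind == 2 && u.contains (p + 1) && ol.contains (p + 1)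
  | none => false

lemma pvLenDiscard (l : List Int) (x : Int) (hnd : l.Nodup) (hm : x ∈ l) :
    ((PySem.Set.discard l x).length : Int) = (l.length : Int) - 1 := by
  have hp : PySem.Set.discard l x = l.erase x := by
    rw [List.Nodup.erase_eq_filter hnd]
    apply List.filter_congr
    intro y _
    by_cases h : y = x <;> simp [h, bne]
  rw [hp, List.length_erase_of_mem hm]
  have : 0 < l.length := List.length_pos_of_mem hm
  omega

lemma pvScan (ol orr : List Int) (hdisj : ∀ y ∈ orr, y ∉ ol) :
    ∀ (u : List Int) (l : PySem.Set Int) (prev : Option Int) (kind um : Int),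
    List.Pairwise (· < ·) u →
    (∀ y ∈ u, y ∈ ol ∨ y ∈ orr) →
    l.Nodup →
    (∀ y ∈ l, y ∈ ol) →
    (∀ p, prev = some p → ∀ z ∈ u, p < z) →
    (∀ y ∈ u, (y ∈ l ↔ (y ∈ ol ∧ ¬(prev = some (y - 1) ∧ kind = 2)))) →
    (∀ y ∈ l, y ∉ u → ((∀ z ∈ u, y < z - 1) ∨ (prev = some y ∧ kind = 1))) →
    (∀ p, prev = some p → kind = 1 → p ∈ l) →
    um = (l.length : Int) + (if pvPend prev kind ol u then 1 else 0) →
    (((u.filter (fun x => PySem.Set.contains orr x)).foldl aStep l).length : Int)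
      = (u.foldl (bStep orr) (um, prev, kind)).1 := by
  intro u
  induction u with
  | nil =>
    intro l prev kind um _ _ _ _ _ _ _ _ hum
    simp only [List.filter_nil, List.foldl_nil]
    have : pvPend prev kind ol [] = false := by
      cases prev <;> simp [pvPend]
    rw [this] at hum
    simpa using hum.symm
  | cons x u ih =>
    intro l prev kind um hpw hmem hnd hsub hprev h6 h7 h8 hum
    have hxlt : ∀ z ∈ u, x < z := (List.pairwise_cons.mp hpw).1
    have hpw' : List.Pairwise (· < ·) u := (List.pairwise_cons.mp hpw).2
    have hplt : ∀ p, prev = some p → p < x := fun p hp => hprev p hp x List.mem_cons_self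
    have hmem' : ∀ y ∈ u, y ∈ ol ∨ y ∈ orr := fun y hy => hmem y (List.mem_cons_of_mem _ hy)
    have hprev' : ∀ p : Int, (some x : Option Int) = some p → ∀ z ∈ u, p < z :=
      fun p hp z hz => (Option.some.inj hp) ▸ hxlt z hz
    -- pending on x :: u forces prev = some (x-1), kind = 2 and x ∈ ol
    have hpendA : pvPend prev kind ol (x :: u) = true ↔ (prev = some (x - 1) ∧ kind = 2 ∧ x ∈ ol) := by
      cases prev with
      | none => simp [pvPend]
      | some p =>
        have hpx : p < x := hplt p rfl
        simp only [pvPend, Bool.and_eq_true, beq_iff_eq, List.contains_eq_mem, decide_eq_true_eq,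
          List.mem_cons, Option.some.injEq]
        constructor
        · rintro ⟨⟨hk, hu⟩, hol⟩
          rcases hu with h | h
          · exact ⟨by omega, hk, by rwa [← h]⟩
          · exact absurd (hxlt _ h) (by omega)
        · rintro ⟨hp, hk, hol⟩
          exact ⟨⟨hk, Or.inl (by omega)⟩, by rwa [show p + 1 = x by omega]⟩
    -- anything strictly below x is far from every element of u
    have hfar : ∀ y : Int, y < x → ∀ z ∈ u, y < z - 1 := by
      intro y hy z hz; have := hxlt z hz; omega
    by_cases hcR : x ∈ orr
    · -- x is a reserve-only student
      have hxol : x ∉ ol := hdisj x hcR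
      have hcRb : PySem.Set.contains orr x = true := (PySem.Set.contains_iff _ _).mpr hcR
      have hpendF : pvPend prev kind ol (x :: u) = false := by
        cases h : pvPend prev kind ol (x :: u)
        · rfl
        · exact absurd (hpendA.mp h).2.2 hxol
      have humL : um = (l.length : Int) := by rw [hum, hpendF]; simp
      rw [List.filter_cons, hcRb, if_pos rfl, List.foldl_cons, List.foldl_cons]
      by_cases hc1 : prev = some (x - 1) ∧ kind = 1
      · -- left lend: A removes x-1, B decrements
        have hx1l : x - 1 ∈ l := h8 (x - 1) hc1.1 hc1.2
        have hA : aStep l x = PySem.Set.discard l (x - 1) := by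
          unfold aStep
          rw [if_pos ((PySem.Set.contains_iff _ _).mpr hx1l),
            PySem.Set.remove?_of_mem hx1l, Option.getD_some]
        have hB : bStep orr (um, prev, kind) x = (um - 1, some x, 0) := by
          unfold bStep
          rw [if_pos hcRb, if_pos (by simp [hc1.1, hc1.2])]
        rw [hA, hB]
        apply ih (PySem.Set.discard l (x - 1)) (some x) 0 (um - 1) hpw' hmem'
          (PySem.Set.nodup_discard l (x - 1) hnd)
          (fun y hy => hsub y ((PySem.Set.mem_discard _ _ _).mp hy).1)
          hprev'
        · intro y hy
          have hyx : x < y := hxlt y hy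
          rw [PySem.Set.mem_discard]
          have h6y := h6 y (List.mem_cons_of_mem _ hy)
          have hnot : ¬(prev = some (y - 1) ∧ kind = 2) := by rw [hc1.2]; omega
          simp only [hnot, not_false_iff, and_true] at h6y
          constructor
          · rintro ⟨hyl, _⟩
            refine ⟨h6y.mp hyl, ?_⟩
            rintro ⟨-, h0⟩; exact absurd h0 (by norm_num)
          · rintro ⟨hyo, -⟩
            exact ⟨h6y.mpr hyo, by omega⟩
        · intro y hy hyu
          have hyl : y ∈ l := ((PySem.Set.mem_discard _ _ _).mp hy).1
          have hyne : y ≠ x - 1 := ((PySem.Set.mem_discard _ _ _).mp hy).2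
          have hynx : y ≠ x := fun h => hxol (h ▸ hsub y hyl)
          have hyu' : y ∉ x :: u := by simp [hynx, hyu]
          rcases h7 y hyl hyu' with h | h
          · exact Or.inl (fun z hz => h z (List.mem_cons_of_mem _ hz))
          · rw [hc1.1] at h
            exact absurd (Option.some.inj h.1).symm hyne
        · exact fun p hp hk => absurd hk (by norm_num)
        · have hld := pvLenDiscard l (x - 1) hnd hx1l
          have hpn : pvPend (some x) 0 ol u = false := by simp [pvPend]
          rw [hpn, if_neg Bool.false_ne_true]
          omega
      · -- x-1 not lendable
        have hx1 : x - 1 ∉ l := by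
          intro hmem1
          have hnotu : x - 1 ∉ x :: u := by
            simp only [List.mem_cons, not_or]
            exact ⟨by omega, fun h => absurd (hxlt _ h) (by omega)⟩
          rcases h7 _ hmem1 hnotu with h | h
          · exact absurd (h x List.mem_cons_self) (by omega)
          · exact hc1 ⟨h.1, h.2⟩
        have hc1b : ¬(PySem.Set.contains l (x - 1) = true) :=
          fun h => hx1 ((PySem.Set.contains_iff _ _).mp h)
        have hcndB : ¬(((prev == some (x - 1)) && (kind == (1 : Int))) = true) := by
          intro h
          simp only [Bool.and_eq_true, beq_iff_eq] at h
          exact hc1 h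
        have hB : bStep orr (um, prev, kind) x = (um, some x, 2) := by
          unfold bStep
          rw [if_pos hcRb, if_neg hcndB]
        have hprevne : ∀ y ∈ u, ¬(prev = some (y - 1) ∧ kind = 2) := by
          rintro y hy ⟨hp, -⟩
          have := hplt (y - 1) hp
          have := hxlt y hy
          omega
        by_cases hc2 : (x + 1) ∈ u ∧ (x + 1) ∈ ol
        · -- right lend: A removes x+1 now, B remembers an unused spare (pending)
          have hx2l : x + 1 ∈ l := by
            have := h6 (x + 1) (List.mem_cons_of_mem _ hc2.1)
            exact this.mpr ⟨hc2.2, hprevne (x + 1) hc2.1⟩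
          have hA : aStep l x = PySem.Set.discard l (x + 1) := by
            unfold aStep
            rw [if_neg hc1b, if_pos ((PySem.Set.contains_iff _ _).mpr hx2l),
              PySem.Set.remove?_of_mem hx2l, Option.getD_some]
          rw [hA, hB]
          apply ih (PySem.Set.discard l (x + 1)) (some x) 2 um hpw' hmem'
            (PySem.Set.nodup_discard l (x + 1) hnd)
            (fun y hy => hsub y ((PySem.Set.mem_discard _ _ _).mp hy).1)
            hprev'
          · intro y hy
            rw [PySem.Set.mem_discard]
            have h6y := h6 y (List.mem_cons_of_mem _ hy)
            simp only [hprevne y hy, not_false_iff, and_true] at h6y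
            constructor
            · rintro ⟨hyl, hyne⟩
              refine ⟨h6y.mp hyl, ?_⟩
              rintro ⟨hpy, -⟩
              exact hyne (by have := Option.some.inj hpy; omega)
            · rintro ⟨hyo, hne⟩
              refine ⟨h6y.mpr hyo, fun h => hne ⟨by rw [h]; congr 1; omega, rfl⟩⟩
          · intro y hy hyu
            have hyl : y ∈ l := ((PySem.Set.mem_discard _ _ _).mp hy).1
            have hynx : y ≠ x := fun h => hxol (h ▸ hsub y hyl)
            have hyu' : y ∉ x :: u := by simp [hynx, hyu]
            rcases h7 y hyl hyu' with h | h
            · exact Or.inl (fun z hz => h z (List.mem_cons_of_mem _ hz))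
            · exact Or.inl (hfar y (hplt y h.1))
          · exact fun p hp hk => absurd hk (by norm_num)
          · have hld := pvLenDiscard l (x + 1) hnd hx2l
            have hpn : pvPend (some x) 2 ol u = true := by
              simp [pvPend, List.contains_eq_mem, hc2.1, hc2.2]
            rw [hpn, if_pos rfl]
            omega
        · -- no lend at all
          have hx2 : x + 1 ∉ l := by
            intro hmem1
            have hol : x + 1 ∈ ol := hsub _ hmem1
            by_cases hu : (x + 1) ∈ u
            · exact hc2 ⟨hu, hol⟩
            · have hnotu : x + 1 ∉ x :: u := by
                simp only [List.mem_cons, not_or]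
                exact ⟨by omega, hu⟩
              rcases h7 _ hmem1 hnotu with h | h
              · exact absurd (h x List.mem_cons_self) (by omega)
              · exact absurd (hplt _ h.1) (by omega)
          have hc2b : ¬(PySem.Set.contains l (x + 1) = true) :=
            fun h => hx2 ((PySem.Set.contains_iff _ _).mp h)
          have hA : aStep l x = l := by
            unfold aStep
            rw [if_neg hc1b, if_neg hc2b]
          rw [hA, hB]
          apply ih l (some x) 2 um hpw' hmem' hnd hsub hprev'
          · intro y hy
            have h6y := h6 y (List.mem_cons_of_mem _ hy)
            simp only [hprevne y hy, not_false_iff, and_true] at h6y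
            constructor
            · intro hyl
              refine ⟨h6y.mp hyl, ?_⟩
              rintro ⟨hpy, -⟩
              have hyx1 : y = x + 1 := by have := Option.some.inj hpy; omega
              exact hx2 (hyx1 ▸ hyl)
            · rintro ⟨hyo, -⟩
              exact h6y.mpr hyo
          · intro y hy hyu
            have hynx : y ≠ x := fun h => hxol (h ▸ hsub y hy)
            have hyu' : y ∉ x :: u := by simp [hynx, hyu]
            rcases h7 y hy hyu' with h | h
            · exact Or.inl (fun z hz => h z (List.mem_cons_of_mem _ hz))
            · exact Or.inl (hfar y (hplt y h.1))
          · exact fun p hp hk => absurd hk (by norm_num)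
          · have hpn : pvPend (some x) 2 ol u = false := by
              cases h : pvPend (some x) 2 ol u
              · rfl
              · simp only [pvPend, Bool.and_eq_true, beq_iff_eq, List.contains_eq_mem,
                  decide_eq_true_eq] at h
                exact absurd ⟨h.1.2, h.2⟩ hc2
            rw [hpn, if_neg Bool.false_ne_true]
            simpa using humL
    · -- x is a lost-only student: A's fold skips it
      have hxol : x ∈ ol := (hmem x List.mem_cons_self).resolve_right hcR
      have hcRb : ¬(PySem.Set.contains orr x = true) :=
        fun h => hcR ((PySem.Set.contains_iff _ _).mp h)
      have hcRb' : PySem.Set.contains orr x = false := by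
        cases h : PySem.Set.contains orr x
        · rfl
        · exact absurd h hcRb
      rw [List.filter_cons, hcRb', if_neg Bool.false_ne_true, List.foldl_cons]
      have hprevne : ∀ y ∈ u, ¬(prev = some (y - 1) ∧ kind = 2) := by
        rintro y hy ⟨hp, -⟩
        have := hplt (y - 1) hp
        have := hxlt y hy
        omega
      by_cases hc1 : prev = some (x - 1) ∧ kind = 2
      · -- B pays the pending debt: the spare at x-1 already took this x on A's side
        have hpendT : pvPend prev kind ol (x :: u) = true :=
          hpendA.mpr ⟨hc1.1, hc1.2, hxol⟩
        have humL : um = (l.length : Int) + 1 := by rw [hum, hpendT]; simp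
        have hxl : x ∉ l := fun h => ((h6 x List.mem_cons_self).mp h).2 hc1
        have hB : bStep orr (um, prev, kind) x = (um - 1, some x, 0) := by
          unfold bStep
          rw [if_neg hcRb, if_pos (by simp [hc1.1, hc1.2])]
        rw [hB]
        apply ih l (some x) 0 (um - 1) hpw' hmem' hnd hsub hprev'
        · intro y hy
          have h6y := h6 y (List.mem_cons_of_mem _ hy)
          simp only [hprevne y hy, not_false_iff, and_true] at h6y
          constructor
          · intro hyl
            refine ⟨h6y.mp hyl, ?_⟩
            rintro ⟨-, h0⟩; exact absurd h0 (by norm_num)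
          · rintro ⟨hyo, -⟩
            exact h6y.mpr hyo
        · intro y hy hyu
          have hynx : y ≠ x := fun h => hxl (h ▸ hy)
          have hyu' : y ∉ x :: u := by simp [hynx, hyu]
          rcases h7 y hy hyu' with h | h
          · exact Or.inl (fun z hz => h z (List.mem_cons_of_mem _ hz))
          · exact absurd h.2 (by rw [hc1.2]; norm_num)
        · exact fun p hp hk => absurd hk (by norm_num)
        · have hpn : pvPend (some x) 0 ol u = false := by simp [pvPend]
          rw [hpn, if_neg Bool.false_ne_true]
          omega
      · -- x stays (for now) an unmatched lost
        have hpendF : pvPend prev kind ol (x :: u) = false := by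
          cases h : pvPend prev kind ol (x :: u)
          · rfl
          · have q := hpendA.mp h
            exact absurd ⟨q.1, q.2.1⟩ hc1
        have humL : um = (l.length : Int) := by rw [hum, hpendF]; simp
        have hxl : x ∈ l := (h6 x List.mem_cons_self).mpr ⟨hxol, hc1⟩
        have hcndB : ¬(((prev == some (x - 1)) && (kind == (2 : Int))) = true) := by
          intro h
          simp only [Bool.and_eq_true, beq_iff_eq] at h
          exact hc1 h
        have hB : bStep orr (um, prev, kind) x = (um, some x, 1) := by
          unfold bStep
          rw [if_neg hcRb, if_neg hcndB]
        rw [hB]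
        apply ih l (some x) 1 um hpw' hmem' hnd hsub hprev'
        · intro y hy
          have h6y := h6 y (List.mem_cons_of_mem _ hy)
          simp only [hprevne y hy, not_false_iff, and_true] at h6y
          constructor
          · intro hyl
            refine ⟨h6y.mp hyl, ?_⟩
            rintro ⟨-, h0⟩; exact absurd h0 (by norm_num)
          · rintro ⟨hyo, -⟩
            exact h6y.mpr hyo
        · intro y hy hyu
          by_cases hynx : y = x
          · exact Or.inr ⟨by rw [hynx], rfl⟩
          · have hyu' : y ∉ x :: u := by simp [hynx, hyu]
            rcases h7 y hy hyu' with h | h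
            · exact Or.inl (fun z hz => h z (List.mem_cons_of_mem _ hz))
            · exact Or.inl (hfar y (hplt y h.1))
        · exact fun p hp _ => (Option.some.inj hp) ▸ hxl
        · have hpn : pvPend (some x) 1 ol u = false := by simp [pvPend]
          rw [hpn, if_neg Bool.false_ne_true]
          simpa using humL

-- ===== VERDICT (by name: the statement is the Claim_ definition above) =====
theorem solution_spec : Claim_equal_solution := by
  intro n lost reserve _hdom
  unfold Spec_solution solution solution_alt
  simp only []
  set L : PySem.Set Int := PySem.Set.ofList lost with hLdef
  set R : PySem.Set Int := PySem.Set.ofList reserve with hRdef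
  have hLnd : L.Nodup := PySem.Set.nodup_ofList lost
  have hRnd : R.Nodup := PySem.Set.nodup_ofList reserve
  -- A's r and l0 are the same lists as B's onlyR and onlyL
  have hr : PySem.Set.diff R (PySem.Set.inter L R) = PySem.Set.diff R L := by
    simp only [PySem.Set.diff]
    refine List.filter_congr ?_
    intro y hy
    congr 1
    rw [Bool.eq_iff_iff, PySem.Set.contains_iff, PySem.Set.contains_iff, PySem.Set.mem_inter]
    exact ⟨fun h => h.1, fun h => ⟨h, hy⟩⟩
  have hl : PySem.Set.diff L (PySem.Set.inter L R) = PySem.Set.diff L R := by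
    simp only [PySem.Set.diff]
    refine List.filter_congr ?_
    intro y hy
    congr 1
    rw [Bool.eq_iff_iff, PySem.Set.contains_iff, PySem.Set.contains_iff, PySem.Set.mem_inter]
    exact ⟨fun h => h.2, fun h => ⟨hy, h⟩⟩
  rw [hr, hl]
  set ol : PySem.Set Int := PySem.Set.diff L R with holdef
  set orr : PySem.Set Int := PySem.Set.diff R L with horrdef
  have holnd : ol.Nodup := PySem.Set.nodup_diff L R hLnd
  have horrnd : orr.Nodup := PySem.Set.nodup_diff R L hRnd
  have hdisj : ∀ y ∈ orr, y ∉ ol := by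
    intro y hy hol
    exact ((PySem.Set.mem_diff R L y).mp hy).2 ((PySem.Set.mem_diff L R y).mp hol).1
  set u : List Int := PySem.List.sorted (PySem.Set.union ol orr) (fun x => x) with hudef
  have hunnd : (PySem.Set.union ol orr).Nodup := PySem.Set.nodup_union ol orr holnd
  have hund : u.Nodup := (PySem.List.sorted_perm _ _ _).nodup_iff.mpr hunnd
  have hmemu : ∀ y, y ∈ u ↔ (y ∈ ol ∨ y ∈ orr) := by
    intro y
    rw [hudef, PySem.List.mem_sorted, PySem.Set.mem_union]
  have hupw : List.Pairwise (· < ·) u := by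
    rw [hudef, ← PySem.Set.ofList_eq_self_of_nodup _ hunnd]
    exact PySem.List.sorted_ofList_pairwise_lt _
  -- A's iteration list sorted(r) is exactly the reserve-only elements of u, in order
  have hfilter : PySem.List.sorted orr (fun x => x)
      = u.filter (fun x => PySem.Set.contains orr x) := by
    apply PySem.List.sorted_eq_of_perm_of_pairwise_lt
    · apply (List.perm_ext_iff_of_nodup (hund.filter _) horrnd).mpr
      intro y
      simp only [List.mem_filter, hmemu y, PySem.Set.contains_iff]
      constructor
      · rintro ⟨-, h⟩; exact h
      · intro h; exact ⟨Or.inr h, h⟩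
    · exact List.Pairwise.sublist List.filter_sublist hupw
  rw [hfilter]
  have hmain := pvScan ol orr hdisj u ol none 0 (PySem.Set.len ol) hupw
    (fun y hy => (hmemu y).mp hy) holnd (fun _ h => h)
    (fun p hp => absurd hp (by simp))
    (by intro y hy; simp)
    (fun y hy hyu => absurd ((hmemu y).mpr (Or.inl hy)) hyu)
    (fun p hp => absurd hp (by simp))
    (by simp [pvPend, PySem.Set.len])
  simp only [PySem.Set.len] at hmain ⊢
  rw [hmain]
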